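-- pv_equiv track=rewrite | github.com/miliar/Code_Jam_Webscraper | solutions_python/solutions_year11_round0_nr1/101.py | solve
-- ===== SOURCE A (Python) =====
-- def parse(line):
--     N, *seq = line.split()
--     N = int(N)
--     return zip(*[iter(seq)] * 2)
--
-- def solve(line):
--     seq = parse(line)
--
--     total_sec = 0
--     pos = {'O': 1, 'B': 1}
--     idle = {'O': 0, 'B': 0}
--     the_other = {'O': 'B', 'B': 'O'}
--     for who, to in seq:
--         to = int(to)
--         sec = max(abs(to - pos[who]) - idle[who], 0) + 1
--         pos[who] = to
--         idle[the_other[who]] += sec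
--         idle[who] = 0
--         total_sec += sec
--
--     return total_sec
-- ===== SOURCE B (Python) =====
-- def solve(line):
--     tokens = line.split()
--     int(tokens[0])  # N, parsed (validation only) and unused, as in the original
--     # stage 1: pair the commands from two step-2 slices (zip truncates an odd trailing token)
--     moves = list(zip(tokens[1::2], [int(x) for x in tokens[2::2]]))
--     # stage 2: travel distance of each move, walking each robot's positions
--     dists = []
--     pos = {'O': 1, 'B': 1}
--     for who, to in moves:
--         dists.append(abs(to - pos[who]))
--         pos[who] = to
--     # stage 3: schedule presses on an absolute clock with per-robot free timestamps
--     t = 0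
--     free = {'O': 0, 'B': 0}
--     for (who, _), d in zip(moves, dists):
--         t = max(t, free[who] + d) + 1
--         free[who] = t
--     return t
-- ===== Notes on version B (the rewrite author's own statement) =====
-- stated objective: alternative
-- what changed: Replaces A's single pass with relative idle counters by a staged pipeline: pair commands from two step-2 slices, compute each move's travel distance in one pass, then schedule presses on an absolute clock with per-robot free timestamps.
import Mathlib
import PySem

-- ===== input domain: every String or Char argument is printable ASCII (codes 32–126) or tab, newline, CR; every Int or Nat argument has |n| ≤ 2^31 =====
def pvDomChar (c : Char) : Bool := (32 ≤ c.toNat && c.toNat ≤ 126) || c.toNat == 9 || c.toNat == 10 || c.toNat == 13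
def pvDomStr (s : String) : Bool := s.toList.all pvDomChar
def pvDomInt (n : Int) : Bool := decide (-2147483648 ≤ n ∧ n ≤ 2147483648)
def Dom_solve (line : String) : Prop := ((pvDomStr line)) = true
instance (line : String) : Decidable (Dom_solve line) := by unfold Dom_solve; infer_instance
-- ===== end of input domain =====

-- B replaces A's one-pass relative idle counters by a staged pipeline: slice-pairing,
-- a travel-distance pass, then absolute-clock scheduling.

-- ===== PORT A =====
-- zip(*[iter(seq)] * 2): consecutive pairs, odd trailing token dropped
def pvPairs : List String → List (String × String)
  | a :: b :: rest => (a, b) :: pvPairs rest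
  | _ => []

-- the dicts pos/idle have the fixed keys 'O','B'; they are held as the tuple fields
-- (total_sec, posO, posB, idleO, idleB); exact under Pre_ (who ∈ {"O","B"}, int(to) parses).
def pvStepA : Int × Int × Int × Int × Int → String × String → Int × Int × Int × Int × Int
  | (total, posO, posB, idleO, idleB), (who, toTok) =>
  let dest := (PySem.Int.ofStr? toTok).getD 0        -- int(to); Pre_ excludes ValueError
  if who == "O" then
    let sec := max (|dest - posO| - idleO) 0 + 1
    (total + sec, dest, posB, 0, idleB + sec)
  else
    let sec := max (|dest - posB| - idleB) 0 + 1
    (total + sec, posO, dest, idleO + sec, 0)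

def solve (line : String) : Int :=
  match PySem.Str.split₀ line with
  | [] => 0                                        -- Python raises ValueError here; outside Pre_
  | _N :: seq =>                                   -- int(N): Pre_ excludes ValueError; value unused
      ((pvPairs seq).foldl pvStepA (0, 1, 1, 0, 0)).1

-- ===== PORT B =====
-- xs[k::2] for nonnegative in-range k is drop k then every other element; the step-2
-- slice is ported by hand as this every-other helper (exact for these nonneg starts).
def pvEveryOther : List String → List String
  | a :: _ :: rest => a :: pvEveryOther rest
  | [a] => [a]
  | [] => []

-- stage 2: travel distances, walking the two robots' positions (pos dict has fixed keys)
def pvDistPass : List (String × Int) → Int → Int → List Int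
  | [], _, _ => []
  | (who, dst) :: rest, posO, posB =>
      if who == "O" then |dst - posO| :: pvDistPass rest dst posB
      else |dst - posB| :: pvDistPass rest posO dst

-- stage 3: absolute clock t with per-robot free timestamps (free dict has fixed keys)
def pvTimePass : List ((String × Int) × Int) → Int → Int → Int → Int
  | [], t, _, _ => t
  | ((who, _), d) :: rest, t, freeO, freeB =>
      if who == "O" then pvTimePass rest (max t (freeO + d) + 1) (max t (freeO + d) + 1) freeB
      else pvTimePass rest (max t (freeB + d) + 1) freeO (max t (freeB + d) + 1)

def solve_alt (line : String) : Int :=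
  match PySem.Str.split₀ line with
  | [] => 0                                        -- Python raises IndexError here; outside Pre_
  | _N :: seq =>                                   -- int(tokens[0]): Pre_ excludes ValueError; value unused
      let moves := (pvEveryOther seq).zip
        ((pvEveryOther seq.tail).map (fun x => (PySem.Int.ofStr? x).getD 0))
      pvTimePass (moves.zip (pvDistPass moves 1 1)) 0 0 0

-- ===== PRECONDITION & SPEC =====
-- A raises on: empty/whitespace line (unpacking), a first token int() rejects, a pair whose
-- first component is not a robot name (KeyError) or whose second int() rejects (ValueError).
def Pre_solve (line : String) : Prop :=
  PySem.Str.split₀ line ≠ [] ∧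
  (PySem.Int.ofStr? ((PySem.Str.split₀ line).headD "")).isSome = true ∧
  ∀ k : Nat, k < (PySem.Str.split₀ line).tail.length / 2 →
    ((PySem.Str.split₀ line).tail.getD (2 * k) "" = "O" ∨
     (PySem.Str.split₀ line).tail.getD (2 * k) "" = "B") ∧
    (PySem.Int.ofStr? ((PySem.Str.split₀ line).tail.getD (2 * k + 1) "")).isSome = true
instance (line : String) : Decidable (Pre_solve line) := by unfold Pre_solve; infer_instance
def pvWitness_solve : String := "4 O 2 B 1 B 4 O 4"

def Spec_solve (line : String) (out : Int) : Prop := out = solve_alt line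
instance (line : String) (out : Int) : Decidable (Spec_solve line out) := by unfold Spec_solve; infer_instance

-- ===== CLAIM (what is proved, stated in full; the proofs are below) =====
def Claim_equal_solve : Prop := ∀ (line : String), Dom_solve line → Pre_solve line → Spec_solve line (solve line)

-- ===== LEMMAS AND PROOFS =====

-- B's zip of step-2 slices produces exactly A's consecutive pairs, ints taken on the seconds
lemma pvMoves_eq (g : String → Int) : ∀ seq : List String,
    (pvEveryOther seq).zip ((pvEveryOther seq.tail).map g)
      = (pvPairs seq).map (fun p => (p.1, g p.2))
  | [] => rfl
  | [_] => rfl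
  | [_, _] => rfl
  | a :: b :: c :: r => by
      have ih := pvMoves_eq g (c :: r)
      simp only [pvEveryOther, List.tail_cons, List.map, List.zip, List.zipWith,
        pvPairs] at ih ⊢
      exact congrArg (List.cons (a, g b)) ih

-- invariant: A's running total equals B's clock, positions agree, and each relative idle
-- counter equals clock minus the corresponding absolute free timestamp
lemma pvFold_agree : ∀ (ps : List (String × String)) (t pO pB fO fB : Int),
    (ps.foldl pvStepA (t, pO, pB, t - fO, t - fB)).1
      = pvTimePass
          (((ps.map (fun p => (p.1, (PySem.Int.ofStr? p.2).getD 0))).zip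
            (pvDistPass (ps.map (fun p => (p.1, (PySem.Int.ofStr? p.2).getD 0))) pO pB)))
          t fO fB
  | [], _, _, _, _, _ => rfl
  | (who, toTok) :: rest, t, pO, pB, fO, fB => by
      simp only [List.map, List.foldl, pvStepA]
      set d := (PySem.Int.ofStr? toTok).getD 0 with hd
      cases hw : (who == "O") with
      | true =>
          simp only [if_true, pvDistPass, hw, List.zip, List.zipWith, pvTimePass]
          have ih := pvFold_agree rest (max t (fO + |d - pO|) + 1) d pB
                (max t (fO + |d - pO|) + 1) fB
          simp only [List.zip] at ih
          rw [← ih]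
          congr 2
          simp only [Prod.mk.injEq]
          exact ⟨by omega, trivial, trivial, by omega, by omega⟩
      | false =>
          simp only [Bool.false_eq_true, if_false, pvDistPass, hw, List.zip, List.zipWith,
            pvTimePass]
          have ih := pvFold_agree rest (max t (fB + |d - pB|) + 1) pO d fO
                (max t (fB + |d - pB|) + 1)
          simp only [List.zip] at ih
          rw [← ih]
          congr 2
          simp only [Prod.mk.injEq]
          exact ⟨by omega, trivial, trivial, by omega, by omega⟩

-- ===== VERDICT (by name: the statement is the Claim_ definition above) =====
theorem solve_spec : Claim_equal_solve := by
  intro line _ _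
  unfold Spec_solve solve solve_alt
  cases h : PySem.Str.split₀ line with
  | nil => rfl
  | cons n seq =>
      simp only [pvMoves_eq]
      have := pvFold_agree (pvPairs seq) 0 1 1 0 0
      simpa using this
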